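-- pv_equiv track=rewrite | github.com/se4en/fantasy_helper | fantasy_helper/app/utils.py | pose_433
-- ===== SOURCE A (Python) =====
-- from typing import List, Tuple, Optional
--
-- def position_to_id(position: str) -> int:
--     position_mapping = {
--         "GK": 1,
--         "RB": 2,
--         "RCB": 3,
--         "CB": 4,
--         "LCB": 5,
--         "LB": 6,
--         "RWB": 7,
--         "LWB": 8,
--         "RDM": 9,
--         "CDM": 10,
--         "LDM": 11,
--         "RM": 12,
--         "RCM": 13,
--         "CM": 14,
--         "LCM": 15,
--         "LM": 16,
--         "RW": 17,
--         "RAM": 18,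
--         "CAM": 19,
--         "LAM": 20,
--         "LW": 21,
--         "RCF": 22,
--         "ST": 23,
--         "LCF": 24,
--         "SS": 25,
--     }
--     return position_mapping.get(position, 0)
--
-- def prepare_name(name: str) -> str:
--     return name
--
-- def pose_433(zones_players: List[List[str]]) -> Tuple[List[int], List[str]]:
--     positions, names = [position_to_id("GK")], [prepare_name(zones_players[0][0])]
--
--     # add defenders
--     for position, name in zip(["RB", "RCB", "LCB", "LB"], zones_players[1]):
--         positions.append(position_to_id(position))
--         names.append(prepare_name(name))
--
--     # add midfielders
--     for position, name in zip(["RCM", "CDM", "LCM"], zones_players[2]):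
--         positions.append(position_to_id(position))
--         names.append(prepare_name(name))
--
--     # add attackers
--     for position, name in zip(["RW", "ST", "LW"], zones_players[3]):
--         positions.append(position_to_id(position))
--         names.append(prepare_name(name))
--
--     return positions, names
-- ===== SOURCE B (Python) =====
-- def pose_433(zones_players):
--     # flat slot table: (position_id, zone_index, index_within_zone) for the 4-3-3
--     slots = [(1, 0, 0),
--              (2, 1, 0), (3, 1, 1), (5, 1, 2), (6, 1, 3),
--              (13, 2, 0), (10, 2, 1), (15, 2, 2),
--              (17, 3, 0), (23, 3, 1), (21, 3, 2)]
--     positions, names = [], []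
--     for pid, z, k in slots:
--         zone = zones_players[z]
--         if k < len(zone):
--             positions.append(pid)
--             names.append(zone[k])
--     return positions, names
-- ===== Notes on version B (the rewrite author's own statement) =====
-- stated objective: alternative
-- what changed: Replaces the dict-lookup plus three per-zone zip loops by a single flat slot table of (position_id, zone, index) triples probed in one loop with a bounds check, so truncation comes from index tests instead of zip and there is no label-to-id lookup at run time.
import Mathlib
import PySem

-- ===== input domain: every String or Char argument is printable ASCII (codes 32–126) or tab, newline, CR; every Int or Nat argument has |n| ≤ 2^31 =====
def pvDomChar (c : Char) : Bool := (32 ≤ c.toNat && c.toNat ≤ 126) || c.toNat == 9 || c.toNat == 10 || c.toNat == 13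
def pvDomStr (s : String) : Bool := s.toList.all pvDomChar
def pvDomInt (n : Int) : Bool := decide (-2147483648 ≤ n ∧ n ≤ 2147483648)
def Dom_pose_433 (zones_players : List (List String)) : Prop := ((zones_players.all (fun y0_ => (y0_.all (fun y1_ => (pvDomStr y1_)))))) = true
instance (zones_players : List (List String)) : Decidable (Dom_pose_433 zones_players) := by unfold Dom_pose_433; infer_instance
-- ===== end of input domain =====

-- B replaces the dict lookup and three zip loops by a single flat slot table
-- (position_id, zone, index) probed with a bounds check (alternative decomposition).


-- ===== PORT A =====
def positionToId (position : String) : Int :=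
  let d : PySem.Dict String Int := PySem.Dict.ofList
    [("GK", 1), ("RB", 2), ("RCB", 3), ("CB", 4), ("LCB", 5), ("LB", 6), ("RWB", 7),
     ("LWB", 8), ("RDM", 9), ("CDM", 10), ("LDM", 11), ("RM", 12), ("RCM", 13), ("CM", 14),
     ("LCM", 15), ("LM", 16), ("RW", 17), ("RAM", 18), ("CAM", 19), ("LAM", 20), ("LW", 21),
     ("RCF", 22), ("ST", 23), ("LCF", 24), ("SS", 25)]
  PySem.Dict.getD d position 0

def prepareName (name : String) : String := name

-- one loop body of A: append position id and name
def poseStep (acc : List Int × List String) (pn : String × String) : List Int × List String :=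
  (acc.1 ++ [positionToId pn.1], acc.2 ++ [prepareName pn.2])

def pose_433 (zones_players : List (List String)) : List Int × List String :=
  let z0 := (PySem.List.pyGet? zones_players 0).getD []
  let gk := (PySem.List.pyGet? z0 0).getD ""        -- none = IndexError, excluded by Pre_
  let init : List Int × List String := ([positionToId "GK"], [prepareName gk])
  let z1 := (PySem.List.pyGet? zones_players 1).getD []
  let acc1 := (List.zip ["RB", "RCB", "LCB", "LB"] z1).foldl poseStep init
  let z2 := (PySem.List.pyGet? zones_players 2).getD []
  let acc2 := (List.zip ["RCM", "CDM", "LCM"] z2).foldl poseStep acc1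
  let z3 := (PySem.List.pyGet? zones_players 3).getD []
  (List.zip ["RW", "ST", "LW"] z3).foldl poseStep acc2

-- ===== PORT B =====
-- one loop body of B: probe zone z at index k, append when the slot is filled
def slotStep (zps : List (List String)) (acc : List Int × List String)
    (s : Int × Int × Int) : List Int × List String :=
  let zone := (PySem.List.pyGet? zps s.2.1).getD []   -- none = IndexError, excluded by Pre_
  if s.2.2 < (zone.length : Int) then
    (acc.1 ++ [s.1], acc.2 ++ [(PySem.List.pyGet? zone s.2.2).getD ""])
  else acc

def pose_433_alt (zones_players : List (List String)) : List Int × List String :=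
  let slots : List (Int × Int × Int) :=
    [(1, 0, 0),
     (2, 1, 0), (3, 1, 1), (5, 1, 2), (6, 1, 3),
     (13, 2, 0), (10, 2, 1), (15, 2, 2),
     (17, 3, 0), (23, 3, 1), (21, 3, 2)]
  slots.foldl (slotStep zones_players) ([], [])

-- ===== PRECONDITION & SPEC =====
-- excludes exactly the inputs where A raises IndexError: fewer than 4 zones, or an empty GK zone
def Pre_pose_433 (zones_players : List (List String)) : Prop :=
  4 ≤ zones_players.length ∧ zones_players.headD [] ≠ []
instance (zones_players : List (List String)) : Decidable (Pre_pose_433 zones_players) := by unfold Pre_pose_433; infer_instance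
def pvWitness_pose_433 : List (List String) := [["g"], ["a", "b"], ["m"], ["s", "t", "u"]]

def Spec_pose_433 (zones_players : List (List String)) (out : List Int × List String) : Prop := out = pose_433_alt zones_players
instance (zones_players : List (List String)) (out : List Int × List String) : Decidable (Spec_pose_433 zones_players out) := by unfold Spec_pose_433; infer_instance

-- ===== CLAIM (what is proved, stated in full; the proofs are below) =====
def Claim_equal_pose_433 : Prop := ∀ (zones_players : List (List String)), Dom_pose_433 zones_players → Pre_pose_433 zones_players → Spec_pose_433 zones_players (pose_433 zones_players)
-- ===== LEMMAS AND PROOFS =====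

-- A's fold over a zipped zone appends the mapped ids and the names
lemma foldl_poseStep (l : List (String × String)) (init : List Int × List String) :
    l.foldl poseStep init =
      (init.1 ++ l.map (fun x => positionToId x.1), init.2 ++ l.map (fun x => x.2)) := by
  induction l generalizing init with
  | nil => simp
  | cons h t ih => simp [poseStep, prepareName, ih]

-- mapping positionToId over a label zip equals the corresponding id zip, componentwise
lemma zip_ids (labels : List String) (ids : List Int)
    (h : labels.map positionToId = ids) (ns : List String) :
    (List.zip labels ns).map (fun x => positionToId x.1) = (List.zip ids ns).map Prod.fst ∧
    (List.zip labels ns).map (fun x => x.2) = (List.zip ids ns).map Prod.snd := by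
  induction labels generalizing ids ns with
  | nil => subst h; simp
  | cons l ls ih =>
    subst h
    cases ns with
    | nil => simp
    | cons n nt =>
      have := ih (ls.map positionToId) rfl nt
      simpa using this

-- the consecutive slots of one zone, starting at index k
def mkSlots (ids : List Int) (z : Int) (k : Nat) : List (Int × Int × Int) :=
  match ids with
  | [] => []
  | i :: t => (i, z, (k : Int)) :: mkSlots t z (k + 1)

-- B's fold over one zone's slot segment appends the id/name pairs of the truncating zip
lemma foldl_mkSlots (zps : List (List String)) (ids : List Int) (z : Int) (k : Nat)
    (acc : List Int × List String) :
    (mkSlots ids z k).foldl (slotStep zps) acc =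
      (acc.1 ++ (List.zip ids (((PySem.List.pyGet? zps z).getD []).drop k)).map Prod.fst,
       acc.2 ++ (List.zip ids (((PySem.List.pyGet? zps z).getD []).drop k)).map Prod.snd) := by
  induction ids generalizing k acc with
  | nil => simp [mkSlots]
  | cons i t ih =>
    set zone := (PySem.List.pyGet? zps z).getD [] with hzone
    simp only [mkSlots, List.foldl_cons, slotStep, ← hzone]
    by_cases h : k < zone.length
    · have hlt : ((k : Int)) < (zone.length : Int) := by exact_mod_cast h
      have hget : (PySem.List.pyGet? zone (k : Int)).getD "" = zone[k] := by
        simp [PySem.List.pyGet?_natCast, List.getElem?_eq_getElem h]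
      have hdrop : zone.drop k = zone[k] :: zone.drop (k + 1) :=
        List.drop_eq_getElem_cons h
      rw [if_pos hlt, hget, ih (k + 1), hdrop]
      simp only [List.zip_cons_cons, List.map_cons, List.append_assoc, List.singleton_append]
    · have hge : ¬ ((k : Int)) < (zone.length : Int) := by
        intro hc; exact h (by exact_mod_cast hc)
      have hdrop : zone.drop k = [] := List.drop_eq_nil_of_le (by omega)
      have hdrop' : zone.drop (k + 1) = [] := List.drop_eq_nil_of_le (by omega)
      rw [if_neg hge, ih (k + 1), hdrop, hdrop']
      simp

-- ===== VERDICT (by name: the statement is the Claim_ definition above) =====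
theorem pose_433_spec : Claim_equal_pose_433 := by
  intro zps _ hpre
  unfold Spec_pose_433 pose_433 pose_433_alt
  obtain ⟨hlen, hz0⟩ := hpre
  match zps, hlen with
  | z0 :: z1 :: z2 :: z3 :: rest, _ =>
    simp only [List.headD] at hz0
    obtain ⟨g, gt, rfl⟩ : ∃ g gt, z0 = g :: gt := by
      cases z0 with
      | nil => exact absurd rfl hz0
      | cons g gt => exact ⟨g, gt, rfl⟩
    have hslots :
        ([(1, 0, 0), (2, 1, 0), (3, 1, 1), (5, 1, 2), (6, 1, 3),
          (13, 2, 0), (10, 2, 1), (15, 2, 2),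
          (17, 3, 0), (23, 3, 1), (21, 3, 2)] : List (Int × Int × Int)) =
        mkSlots [1] 0 0 ++ mkSlots [2, 3, 5, 6] 1 0 ++
          mkSlots [13, 10, 15] 2 0 ++ mkSlots [17, 23, 21] 3 0 := by
      simp [mkSlots]
    have e0 : ((PySem.List.pyGet? ((g :: gt) :: z1 :: z2 :: z3 :: rest) 0).getD []) = g :: gt := by
      have h : (0 : Int) ≤ (rest.length : Int) + 1 + 1 + 1 := by omega
      simp [PySem.List.pyGet?, PySem.List.pyIdx?, h]
    have e1 : (PySem.List.pyGet? ((g :: gt) :: z1 :: z2 :: z3 :: rest) 1).getD [] = z1 := by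
      have h : (0 : Int) ≤ (rest.length : Int) + 1 + 1 := by omega
      simp [PySem.List.pyGet?, PySem.List.pyIdx?, h]
    have e2 : (PySem.List.pyGet? ((g :: gt) :: z1 :: z2 :: z3 :: rest) 2).getD [] = z2 := by
      have h : (2 : Int) ≤ (rest.length : Int) + 1 + 1 + 1 := by omega
      simp [PySem.List.pyGet?, PySem.List.pyIdx?, h]
    have e3 : (PySem.List.pyGet? ((g :: gt) :: z1 :: z2 :: z3 :: rest) 3).getD [] = z3 := by
      have h : (3 : Int) ≤ (rest.length : Int) + 1 + 1 + 1 := by omega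
      simp [PySem.List.pyGet?, PySem.List.pyIdx?, h]
    have eg : (PySem.List.pyGet? (g :: gt) 0).getD "" = g := by
      simp [PySem.List.pyGet?, PySem.List.pyIdx?]
    have h1 := zip_ids ["RB", "RCB", "LCB", "LB"] [2, 3, 5, 6] (by decide) z1
    have h2 := zip_ids ["RCM", "CDM", "LCM"] [13, 10, 15] (by decide) z2
    have h3 := zip_ids ["RW", "ST", "LW"] [17, 23, 21] (by decide) z3
    have hgk : positionToId "GK" = (1 : Int) := by decide
    rw [hslots]
    simp only [List.foldl_append, foldl_mkSlots, e0, e1, e2, e3, eg, foldl_poseStep,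
      h1.1, h1.2, h2.1, h2.2, h3.1, h3.2, hgk, prepareName, List.drop_zero]
    simp
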